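-- pv_equiv track=rewrite | github.com/mingunkim123/Private-TMO | TMO/main/utils.py | create_long_samples
-- ===== SOURCE A (Python) =====
-- def create_long_samples(episodes):
--     long_samples = []
--     for episode in episodes:
--         states, actions, rewards, association_scores = episode
--         long_states = []
--         for state in states:
--             long_states.append(state)
--
--         extended_states = []
--         for i in range(len(long_states)):
--             history = [long_states[j] if j >= 0 else [-1, -1, -1, -1, -1] for j in range(i - 4, i)]
--             extended_state = [item for sublist in history for item in sublist] + long_states[i]
--             extended_states.append(extended_state)
--
--         long_samples.append((extended_states, actions, rewards, association_scores))
--     return long_samples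
-- ===== SOURCE B (Python) =====
-- def create_long_samples(episodes):
--     long_samples = []
--     for states, actions, rewards, association_scores in episodes:
--         window = [[-1, -1, -1, -1, -1]] * 4
--         extended_states = []
--         for state in states:
--             extended_states.append([x for row in window for x in row] + state)
--             window = window[1:] + [state]
--         long_samples.append((extended_states, actions, rewards, association_scores))
--     return long_samples
-- ===== Notes on version B (the rewrite author's own statement) =====
-- stated objective: alternative
-- what changed: B carries a 4-row sliding window across the iteration (shift-and-append each step) instead of recomputing the range(i-4,i) back-index list for every state.
import Mathlib
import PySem

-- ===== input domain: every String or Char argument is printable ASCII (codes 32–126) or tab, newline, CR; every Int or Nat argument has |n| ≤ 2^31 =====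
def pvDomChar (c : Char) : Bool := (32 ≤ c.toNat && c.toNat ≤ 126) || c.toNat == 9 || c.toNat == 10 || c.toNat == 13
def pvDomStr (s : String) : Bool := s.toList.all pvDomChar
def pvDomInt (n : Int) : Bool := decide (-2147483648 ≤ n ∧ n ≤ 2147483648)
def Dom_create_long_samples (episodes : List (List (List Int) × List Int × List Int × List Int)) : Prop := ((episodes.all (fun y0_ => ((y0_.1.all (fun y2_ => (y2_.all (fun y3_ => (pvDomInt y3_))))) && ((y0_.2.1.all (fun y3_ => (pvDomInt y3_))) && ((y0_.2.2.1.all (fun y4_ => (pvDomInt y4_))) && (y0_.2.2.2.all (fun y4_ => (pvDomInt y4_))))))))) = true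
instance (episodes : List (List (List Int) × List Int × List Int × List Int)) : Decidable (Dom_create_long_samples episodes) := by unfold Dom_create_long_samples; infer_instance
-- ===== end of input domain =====

-- B replaces A's per-index range(i-4,i) history recomputation by a sliding 4-row window
-- carried across the loop (alternative decomposition, same asymptotic cost).

-- ===== PORT A =====
-- indices j with 0 ≤ j < i and i itself are always in range, so pyGetD's default is never used
def create_long_samples (episodes : List (List (List Int) × List Int × List Int × List Int)) : List (List (List Int) × List Int × List Int × List Int) :=
  episodes.foldl (fun long_samples episode =>
    let states := episode.1
    let long_states := states.foldl (fun acc state => acc ++ [state]) []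
    let extended_states :=
      (PySem.List.pyRange 0 long_states.length 1).foldl (fun acc i =>
        let history := (PySem.List.pyRange (i - 4) i 1).map (fun j =>
          if j ≥ 0 then PySem.List.pyGetD long_states j [] else [-1, -1, -1, -1, -1])
        let extended_state := history.flatten ++ PySem.List.pyGetD long_states i []
        acc ++ [extended_state]) []
    long_samples ++ [(extended_states, episode.2.1, episode.2.2.1, episode.2.2.2)]) []

-- ===== PORT B =====
def create_long_samples_alt (episodes : List (List (List Int) × List Int × List Int × List Int)) : List (List (List Int) × List Int × List Int × List Int) :=
  episodes.foldl (fun long_samples episode =>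
    let pad : List Int := [-1, -1, -1, -1, -1]
    let r := episode.1.foldl
      (fun (acc : List (List Int) × List (List Int)) state =>
        (acc.1.drop 1 ++ [state], acc.2 ++ [acc.1.flatten ++ state]))
      ([pad, pad, pad, pad], [])
    long_samples ++ [(r.2, episode.2.1, episode.2.2.1, episode.2.2.2)]) []

-- ===== PRECONDITION & SPEC =====
def Spec_create_long_samples (episodes : List (List (List Int) × List Int × List Int × List Int)) (out : List (List (List Int) × List Int × List Int × List Int)) : Prop := out = create_long_samples_alt episodes
instance (episodes : List (List (List Int) × List Int × List Int × List Int)) (out : List (List (List Int) × List Int × List Int × List Int)) : Decidable (Spec_create_long_samples episodes out) := by unfold Spec_create_long_samples; infer_instance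

-- ===== CLAIM (what is proved, stated in full; the proofs are below) =====
def Claim_equal_create_long_samples : Prop := ∀ (episodes : List (List (List Int) × List Int × List Int × List Int)), Dom_create_long_samples episodes → Spec_create_long_samples episodes (create_long_samples episodes)

-- ===== LEMMAS AND PROOFS =====

-- the history lookup A performs at index j
def pvH (ls : List (List Int)) (j : Int) : List Int :=
  if j ≥ 0 then PySem.List.pyGetD ls j [] else [-1, -1, -1, -1, -1]

-- A's extended state at index i
def pvExt (ls : List (List Int)) (i : Int) : List Int :=
  ((PySem.List.pyRange (i - 4) i 1).map (pvH ls)).flatten ++ PySem.List.pyGetD ls i []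

-- the sequence of extended states B's fold produces from window `win`
def pvGen : List (List Int) → List (List Int) → List (List Int)
  | _, [] => []
  | win, s :: t => (win.flatten ++ s) :: pvGen (win.drop 1 ++ [s]) t

theorem pv_copy {α : Type} (l acc : List α) :
    l.foldl (fun a s => a ++ [s]) acc = acc ++ l := by
  induction l generalizing acc with
  | nil => simp
  | cons x t ih => simp [List.foldl, ih]

theorem pv_foldl_map {α β : Type} (l : List α) (g : α → β) (acc : List β) :
    l.foldl (fun a x => a ++ [g x]) acc = acc ++ l.map g := by
  induction l generalizing acc with
  | nil => simp
  | cons x t ih => simp [List.foldl, ih]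

theorem pv_genB (l : List (List Int)) (win out : List (List Int)) :
    (l.foldl (fun (acc : List (List Int) × List (List Int)) s =>
        (acc.1.drop 1 ++ [s], acc.2 ++ [acc.1.flatten ++ s])) (win, out)).2
      = out ++ pvGen win l := by
  induction l generalizing win out with
  | nil => simp [pvGen]
  | cons s t ih =>
    simp only [List.foldl_cons]
    rw [ih]
    simp [pvGen]

theorem pv_range4 (i : Int) :
    PySem.List.pyRange (i - 4) i 1 = [i - 4, i - 3, i - 2, i - 1] := by
  rw [PySem.List.pyRange_one_cons (by omega)]
  rw [show i - 4 + 1 = i - 3 by ring, PySem.List.pyRange_one_cons (by omega)]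
  rw [show i - 3 + 1 = i - 2 by ring, PySem.List.pyRange_one_cons (by omega)]
  rw [show i - 2 + 1 = i - 1 by ring, PySem.List.pyRange_one_cons (by omega)]
  rw [show i - 1 + 1 = i by ring, PySem.List.pyRange_one_eq_nil (by omega)]

theorem pvH_prefix (hs rest : List (List Int)) (j : Int) (hj : j < (hs.length : Int)) :
    pvH (hs ++ rest) j = pvH hs j := by
  unfold pvH
  split_ifs with h0
  · have hk : j = ((j.toNat : Nat) : Int) := by omega
    rw [hk, PySem.List.pyGetD_natCast, PySem.List.pyGetD_natCast]
    have hlt : j.toNat < hs.length := by omega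
    simp [List.getD, List.getElem?_append_left hlt]
  · rfl

theorem pvGetD_mid (hs t : List (List Int)) (s : List Int) :
    PySem.List.pyGetD (hs ++ s :: t) (hs.length : Int) [] = s := by
  rw [show ((hs.length : Nat) : Int) = ((hs.length : Nat) : Int) from rfl,
      PySem.List.pyGetD_natCast]
  simp [List.getD]

theorem pv_core (rest hs : List (List Int)) :
    pvGen [pvH hs ((hs.length : Int) - 4), pvH hs ((hs.length : Int) - 3),
           pvH hs ((hs.length : Int) - 2), pvH hs ((hs.length : Int) - 1)] rest
      = (List.range rest.length).map
          (fun (k : Nat) => pvExt (hs ++ rest) ((hs.length : Int) + (k : Int))) := by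
  induction rest generalizing hs with
  | nil => simp [pvGen]
  | cons s t ih =>
    simp only [List.length_cons, List.range_succ_eq_map, List.map_cons, List.map_map]
    rw [pvGen]
    refine List.cons_eq_cons.mpr ⟨?_, ?_⟩
    · -- head
      show _ = pvExt (hs ++ s :: t) ((hs.length : Int) + ((0 : Nat) : Int))
      rw [show ((hs.length : Int) + ((0 : Nat) : Int)) = (hs.length : Int) by omega]
      unfold pvExt
      rw [pv_range4]
      simp only [List.map_cons, List.map_nil]
      rw [pvH_prefix hs (s :: t) ((hs.length : Int) - 4) (by omega),
          pvH_prefix hs (s :: t) ((hs.length : Int) - 3) (by omega),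
          pvH_prefix hs (s :: t) ((hs.length : Int) - 2) (by omega),
          pvH_prefix hs (s :: t) ((hs.length : Int) - 1) (by omega)]
      rw [pvGetD_mid hs t s]
    · -- tail
      have hw : List.drop 1 [pvH hs ((hs.length : Int) - 4), pvH hs ((hs.length : Int) - 3),
            pvH hs ((hs.length : Int) - 2), pvH hs ((hs.length : Int) - 1)] ++ [s]
          = [pvH (hs ++ [s]) (((hs ++ [s]).length : Int) - 4),
             pvH (hs ++ [s]) (((hs ++ [s]).length : Int) - 3),
             pvH (hs ++ [s]) (((hs ++ [s]).length : Int) - 2),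
             pvH (hs ++ [s]) (((hs ++ [s]).length : Int) - 1)] := by
        have hl : (((hs ++ [s]).length : Int)) = (hs.length : Int) + 1 := by simp
        rw [hl]
        rw [show (hs.length : Int) + 1 - 4 = (hs.length : Int) - 3 by ring,
            show (hs.length : Int) + 1 - 3 = (hs.length : Int) - 2 by ring,
            show (hs.length : Int) + 1 - 2 = (hs.length : Int) - 1 by ring,
            show (hs.length : Int) + 1 - 1 = (hs.length : Int) by ring]
        rw [pvH_prefix hs [s] _ (by omega), pvH_prefix hs [s] _ (by omega),
            pvH_prefix hs [s] _ (by omega)]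
        have hlast : pvH (hs ++ [s]) (hs.length : Int) = s := by
          unfold pvH
          rw [if_pos (by omega)]
          exact pvGetD_mid hs [] s
        rw [hlast]
        simp
      rw [hw, ih (hs ++ [s])]
      refine List.map_congr_left (fun k _ => ?_)
      have harg : (((hs ++ [s]).length : Int) + (k : Int)) = ((hs.length : Int) + ((k + 1 : Nat) : Int)) := by
        simp; omega
      rw [List.append_assoc]
      simp only [List.singleton_append]
      rw [harg]
      rfl

theorem pv_episode (states : List (List Int)) :
    (PySem.List.pyRange 0 (states.length : Int) 1).map (pvExt states)
      = pvGen [[-1,-1,-1,-1,-1],[-1,-1,-1,-1,-1],[-1,-1,-1,-1,-1],[-1,-1,-1,-1,-1]] states := by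
  have hc := pv_core states []
  have hpads : pvH ([] : List (List Int)) (((List.length ([] : List (List Int))) : Int) - 4) = [-1,-1,-1,-1,-1] ∧
      pvH ([] : List (List Int)) (((List.length ([] : List (List Int))) : Int) - 3) = [-1,-1,-1,-1,-1] ∧
      pvH ([] : List (List Int)) (((List.length ([] : List (List Int))) : Int) - 2) = [-1,-1,-1,-1,-1] ∧
      pvH ([] : List (List Int)) (((List.length ([] : List (List Int))) : Int) - 1) = [-1,-1,-1,-1,-1] := by
    refine ⟨?_, ?_, ?_, ?_⟩ <;> (unfold pvH; rw [if_neg (by norm_num)])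
  obtain ⟨h1, h2, h3, h4⟩ := hpads
  rw [h1, h2, h3, h4] at hc
  simp only [List.nil_append, List.length_nil, Int.natCast_zero, Int.zero_add] at hc
  rw [hc]
  rw [PySem.List.pyRange_one, List.map_map]
  simp

-- ===== VERDICT (by name: the statement is the Claim_ definition above) =====
theorem create_long_samples_spec : Claim_equal_create_long_samples := by
  intro episodes _
  unfold Spec_create_long_samples create_long_samples create_long_samples_alt
  rw [pv_foldl_map, pv_foldl_map, List.nil_append, List.nil_append]
  refine List.map_congr_left (fun ep _ => ?_)
  simp only []
  rw [pv_copy, List.nil_append, pv_foldl_map, List.nil_append, pv_genB, List.nil_append]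
  rw [show (fun i => ((PySem.List.pyRange (i - 4) i 1).map (fun j =>
        if j ≥ 0 then PySem.List.pyGetD ep.1 j [] else [-1, -1, -1, -1, -1])).flatten
        ++ PySem.List.pyGetD ep.1 i []) = pvExt ep.1 from rfl]
  rw [pv_episode]
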